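-- pv_equiv track=rewrite | github.com/miliar/Code_Jam_Webscraper | solutions_python/Problem_74/268.py | f
-- ===== SOURCE A (Python) =====
-- def f(l):
--     begin={'O':1,'B':1}
--     last=l[0][0]
--     lasttime=0
--     result=0
--     for k in l:
--         robot=k[0]
--         if robot==last:
--             lasttime+=1+abs(k[1]-begin[robot])
--             result+=1+abs(k[1]-begin[robot])
--             begin[robot]=k[1]
--         else:
--             temp=abs(k[1]-begin[robot])
--             temp=max(temp,lasttime)
--             lasttime=1+temp-lasttime
--             result+=lasttime
--             begin[robot]=k[1]
--             last=robot
--     return result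
-- ===== SOURCE B (Python) =====
-- def f(l):
--     pos = {'O': 1, 'B': 1}
--     last_press = {'O': 0, 'B': 0}
--     cur_time = 0
--     for robot, btn in l:
--         travel = abs(pos[robot] - btn)
--         press = max(cur_time + 1, last_press[robot] + travel + 1)
--         cur_time = press
--         last_press[robot] = press
--         pos[robot] = btn
--     return cur_time
-- ===== Notes on version B (the rewrite author's own statement) =====
-- stated objective: simpler
-- what changed: B tracks per-robot absolute press times and positions and takes a clean max(cur_time+1, last_press+travel+1) per command, replacing A's single relative 'lasttime' accumulator with its last-robot switch and 1+temp-lasttime formula.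
import Mathlib
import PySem

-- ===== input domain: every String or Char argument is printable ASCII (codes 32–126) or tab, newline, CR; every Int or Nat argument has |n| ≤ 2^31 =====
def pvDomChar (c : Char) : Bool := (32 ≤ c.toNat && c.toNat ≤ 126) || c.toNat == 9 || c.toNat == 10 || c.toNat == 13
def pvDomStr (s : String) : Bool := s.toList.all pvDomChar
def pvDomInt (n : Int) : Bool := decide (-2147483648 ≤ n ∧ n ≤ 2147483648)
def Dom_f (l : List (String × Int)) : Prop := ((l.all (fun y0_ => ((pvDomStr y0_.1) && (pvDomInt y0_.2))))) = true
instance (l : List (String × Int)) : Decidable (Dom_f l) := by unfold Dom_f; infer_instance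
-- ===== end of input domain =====

-- B replaces A's relative 'lasttime' accumulator and last-robot switch by per-robot
-- absolute press times with a plain max; equivalence is about the return value only.

-- ===== PORT A =====
-- A's loop state: (begin dict, last, lasttime, result).
-- begin[robot] is ported as getD robot 0: Pre_f guarantees robot ∈ {"O","B"}, which is
-- always a key of the dict, so the default 0 is never used (Python raises KeyError there).
def stepA (s : PySem.Dict String Int × String × Int × Int) (k : String × Int) :
    PySem.Dict String Int × String × Int × Int :=
  let (beg, last, lasttime, result) := s
  let robot := k.1
  if robot == last then
    (beg.insert robot k.2, last, lasttime + (1 + |k.2 - beg.getD robot 0|),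
     result + (1 + |k.2 - beg.getD robot 0|))
  else
    let temp := max (|k.2 - beg.getD robot 0|) lasttime
    (beg.insert robot k.2, robot, 1 + temp - lasttime, result + (1 + temp - lasttime))

def f (l : List (String × Int)) : Int :=
  match l with
  | [] => 0  -- Python raises IndexError on l[0][0]; excluded by Pre_f
  | k0 :: _ =>
    (l.foldl stepA (PySem.Dict.ofList [("O", 1), ("B", 1)], k0.1, 0, 0)).2.2.2

-- ===== PORT B =====
-- B's loop state: (pos dict, last_press dict, cur_time). Same getD-totalization remark.
def stepB (s : PySem.Dict String Int × PySem.Dict String Int × Int) (k : String × Int) :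
    PySem.Dict String Int × PySem.Dict String Int × Int :=
  let (pos, lastp, cur) := s
  let robot := k.1
  let travel := |pos.getD robot 0 - k.2|
  let press := max (cur + 1) (lastp.getD robot 0 + travel + 1)
  (pos.insert robot k.2, lastp.insert robot press, press)

def f_alt (l : List (String × Int)) : Int :=
  (l.foldl stepB
    (PySem.Dict.ofList [("O", 1), ("B", 1)], PySem.Dict.ofList [("O", 0), ("B", 0)], 0)).2.2

-- ===== PRECONDITION & SPEC =====
-- Pre_f excludes exactly the inputs on which Python A raises: the empty list
-- (IndexError on l[0][0]) and any command whose robot is not 'O' or 'B' (KeyError).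
def Pre_f (l : List (String × Int)) : Prop :=
  l ≠ [] ∧ ∀ p ∈ l, p.1 = "O" ∨ p.1 = "B"
instance (l : List (String × Int)) : Decidable (Pre_f l) := by unfold Pre_f; infer_instance

def pvWitness_f : (List (String × Int)) := [("O", 2), ("B", 1), ("B", 2), ("O", 4)]

def Spec_f (l : List (String × Int)) (out : Int) : Prop := out = f_alt l
instance (l : List (String × Int)) (out : Int) : Decidable (Spec_f l out) := by unfold Spec_f; infer_instance

-- ===== CLAIM (what is proved, stated in full; the proofs are below) =====
def Claim_equal_f : Prop := ∀ (l : List (String × Int)), Dom_f l → Pre_f l → Spec_f l (f l)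

-- ===== LEMMAS AND PROOFS =====

-- The coupling invariant between A's state and B's state.
def InvAB (sa : PySem.Dict String Int × String × Int × Int)
    (sb : PySem.Dict String Int × PySem.Dict String Int × Int) : Prop :=
  (sa.2.1 = "O" ∨ sa.2.1 = "B") ∧
  sa.1.getD "O" 0 = sb.1.getD "O" 0 ∧
  sa.1.getD "B" 0 = sb.1.getD "B" 0 ∧
  sa.2.2.2 = sb.2.2 ∧
  sb.2.1.getD sa.2.1 0 = sb.2.2 ∧
  sa.2.2.1 = sb.2.2 - sb.2.1.getD (if sa.2.1 = "O" then "B" else "O") 0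

theorem inv_step (sa : PySem.Dict String Int × String × Int × Int)
    (sb : PySem.Dict String Int × PySem.Dict String Int × Int)
    (k : String × Int) (hk : k.1 = "O" ∨ k.1 = "B") (h : InvAB sa sb) :
    InvAB (stepA sa k) (stepB sb k) := by
  obtain ⟨beg, last, lasttime, result⟩ := sa
  obtain ⟨pos, lastp, cur⟩ := sb
  obtain ⟨hlast, hO, hB, hres, hlp, hlt⟩ := h
  simp only at hlast hO hB hres hlp hlt
  rcases hk with hk | hk <;> rcases hlast with hl | hl <;> subst hl <;>
    simp only [InvAB, stepA, stepB, hk, beq_iff_eq, reduceIte, String.reduceEq,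
      PySem.Dict.getD_insert, if_true, if_false] at hlt ⊢ <;>
    refine ⟨by simp, ?_, ?_, ?_, ?_, ?_⟩ <;>
    simp [hk, PySem.Dict.getD_insert, hO, hB, hres, hlp, hlt, abs_sub_comm] <;> omega

theorem inv_foldl (l : List (String × Int)) (sa : PySem.Dict String Int × String × Int × Int)
    (sb : PySem.Dict String Int × PySem.Dict String Int × Int)
    (hl : ∀ p ∈ l, p.1 = "O" ∨ p.1 = "B") (h : InvAB sa sb) :
    (l.foldl stepA sa).2.2.2 = (l.foldl stepB sb).2.2 := by
  induction l generalizing sa sb with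
  | nil => exact h.2.2.2.1
  | cons k t ih =>
    simp only [List.foldl_cons]
    exact ih _ _ (fun p hp => hl p (List.mem_cons_of_mem _ hp))
      (inv_step _ _ _ (hl k (List.mem_cons_self)) h)

-- ===== VERDICT (by name: the statement is the Claim_ definition above) =====
theorem f_spec : Claim_equal_f := by
  intro l _ hpre
  obtain ⟨hne, hrob⟩ := hpre
  unfold Spec_f f f_alt
  match l, hne with
  | k0 :: t, _ =>
    apply inv_foldl _ _ _ hrob
    have h0 := hrob k0 List.mem_cons_self
    unfold InvAB
    rcases h0 with h | h <;> simp [h, PySem.Dict.ofList, PySem.Dict.getD, PySem.Dict.get?] <;> decide
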